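-- pv_equiv track=rewrite | github.com/tstramer/stanford | cs238/project/app/learning/user_convo_helper.py | get_in_reply_to_chains
-- ===== SOURCE A (Python) =====
-- def get_in_reply_to_chains(tweet_id_to_tweet):
--     in_reply_to_chains_set = {}
--     for (tweet_id, tweet) in tweet_id_to_tweet.items():
--         all_in_reply_tos = set()
--         curr_tweet = tweet
--         while True:
--             if not "in_reply_to_status_id" in curr_tweet:
--                 break
--             in_reply_to = curr_tweet["in_reply_to_status_id"]
--             if in_reply_to == None or (not in_reply_to in tweet_id_to_tweet):
--                 break
--             curr_tweet = tweet_id_to_tweet[in_reply_to]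
--             all_in_reply_tos.add(in_reply_to)
--         in_reply_to_chains_set[tweet_id] = all_in_reply_tos
--
--     in_reply_to_chains = {}
--     for (tweet_id, replies) in in_reply_to_chains_set.items():
--         in_reply_to_chains[tweet_id] = list(replies)
--         in_reply_to_chains[tweet_id].sort()
--     return in_reply_to_chains
-- ===== SOURCE B (Python) =====
-- def get_in_reply_to_chains(tweet_id_to_tweet):
--     memo = {}
--     result = {}
--     empty = []  # chains are never mutated once built, so the empty chain can be shared
--     for tid, tw in tweet_id_to_tweet.items():
--         if tid in memo:
--             result[tid] = memo[tid]
--             continue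
--         p = tw.get("in_reply_to_status_id")
--         if p is None or p not in tweet_id_to_tweet:
--             result[tid] = memo[tid] = empty
--             continue
--         path = [(tid, p)]
--         cur = p
--         while cur not in memo:
--             q = tweet_id_to_tweet[cur].get("in_reply_to_status_id")
--             if q is None or q not in tweet_id_to_tweet:
--                 memo[cur] = empty
--                 break
--             path.append((cur, q))
--             cur = q
--         for (node, q) in reversed(path):
--             sub = memo[q]
--             i = 0
--             while i < len(sub) and sub[i] < q:
--                 i += 1
--             memo[node] = sub[:i] + [q] + sub[i:]
--         result[tid] = memo[tid]
--     return result
-- ===== Notes on version B (the rewrite author's own statement) =====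
-- stated objective: alternative
-- what changed: B memoizes each tweet's sorted ancestor chain, building it from the parent's cached sorted chain by a single ordered insertion (with a direct path for reply-less and already-memoized tweets), instead of A's per-tweet full chain re-walk into a set followed by a per-tweet sort; Pre_ excludes cyclic reply graphs (A's while-True loop never returns there) and association lists with duplicate tweet ids (a Python dict cannot hold them). Intended as faster (removes the re-walks and the per-tweet sorts; measured 1.27x at the largest size, below the 1.5x bar, so not claimed).
import Mathlib
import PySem

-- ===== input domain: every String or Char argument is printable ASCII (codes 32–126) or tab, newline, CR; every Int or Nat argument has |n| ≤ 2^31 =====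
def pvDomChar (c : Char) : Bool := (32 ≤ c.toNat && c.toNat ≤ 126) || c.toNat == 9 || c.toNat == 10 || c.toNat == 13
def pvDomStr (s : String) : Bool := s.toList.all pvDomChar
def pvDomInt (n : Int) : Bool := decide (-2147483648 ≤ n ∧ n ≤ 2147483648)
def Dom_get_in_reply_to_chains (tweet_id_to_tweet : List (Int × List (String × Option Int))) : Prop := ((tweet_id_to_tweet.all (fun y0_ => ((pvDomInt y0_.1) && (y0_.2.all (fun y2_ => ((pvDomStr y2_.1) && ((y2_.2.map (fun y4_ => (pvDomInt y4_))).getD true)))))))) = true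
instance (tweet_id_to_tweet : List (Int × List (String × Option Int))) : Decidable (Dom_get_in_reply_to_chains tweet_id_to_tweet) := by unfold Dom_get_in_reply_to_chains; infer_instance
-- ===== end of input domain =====

-- B memoizes each tweet's sorted ancestor chain (built from the parent's cached sorted chain by one
-- ordered insertion, with a direct path for already-memoized and reply-less tweets) instead of A's
-- per-tweet full chain re-walk into a set plus a per-tweet sort; equivalence is proved on acyclic,
-- duplicate-free inputs (Pre_).

-- ===== PORT A =====
-- The Nat fuel only makes A's unbounded 'while True' walk structurally recursive; under Pre_
-- (acyclic reply graph) every walk breaks before (length + 1) steps, so the fuel never runs out.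
def pvWalkA (d : List (Int × List (String × Option Int))) :
    Nat → List (String × Option Int) → PySem.Set Int → PySem.Set Int
  | 0, _, s => s
  | f+1, curr, s =>
    match (PySem.Dict.mk curr).get? "in_reply_to_status_id" with
    | none => s                        -- key absent: break
    | some none => s                   -- in_reply_to == None: break
    | some (some p) =>
      match (PySem.Dict.mk d).get? p with
      | none => s                      -- in_reply_to not in dict: break
      | some tw => pvWalkA d f tw (PySem.Set.add s p)

def get_in_reply_to_chains (tweet_id_to_tweet : List (Int × List (String × Option Int))) :
    List (Int × List Int) :=
  let chains_set : PySem.Dict Int (PySem.Set Int) :=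
    tweet_id_to_tweet.foldl
      (fun acc pr =>
        acc.insert pr.1 (pvWalkA tweet_id_to_tweet (tweet_id_to_tweet.length + 1) pr.2 PySem.Set.empty))
      PySem.Dict.empty
  -- 'list(replies)' followed by the in-place '.sort()' is ported as one sorted-list insert
  let chains : PySem.Dict Int (List Int) :=
    chains_set.items.foldl
      (fun acc pr => acc.insert pr.1 (PySem.List.sorted pr.2 (fun x => x) false))
      PySem.Dict.empty
  chains.items

-- ===== PORT B =====
-- Source B's 'parent' helper: the id the tweet replies to, if it is a key of the dict.
-- (Python's tweet_id_to_tweet[tid] is only reached with tid a key; the 'none' on a missing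
-- tid totalizes what would be a KeyError.)
def pvParent (d : List (Int × List (String × Option Int))) (tid : Int) : Option Int :=
  match (PySem.Dict.mk d).get? tid with
  | none => none
  | some tw =>
    match (PySem.Dict.mk tw).get? "in_reply_to_status_id" with
    | some (some p) => if (PySem.Dict.mk d).contains p then some p else none
    | _ => none

-- Source B's linear scan 'while i < len(sub) and sub[i] < p' + slice splice
def pvInsSorted (p : Int) : List Int → List Int
  | [] => [p]
  | x :: xs => if x < p then x :: pvInsSorted p xs else p :: x :: xs

-- Source B's 'while cur not in memo' walk-up loop; fuel as in port A (never exhausted under Pre_).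
def pvWalkUp (d : List (Int × List (String × Option Int))) :
    Nat → PySem.Dict Int (List Int) → Int → List (Int × Int) →
    List (Int × Int) × PySem.Dict Int (List Int)
  | 0, memo, _, path => (path, memo)
  | f+1, memo, cur, path =>
    if memo.contains cur then (path, memo)
    else
      match pvParent d cur with
      | none => (path, memo.insert cur [])
      | some p => pvWalkUp d f memo p (path ++ [(cur, p)])

-- one iteration of Source B's outer 'for tid, tw in tweet_id_to_tweet.items()' loop,
-- state = (memo, result); the branches are Source B's 'tid in memo' / trivial-parent direct paths.
-- (memo[q] / memo[tid] are reads of keys present under Pre_; getD totalizes them)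
def pvStepB (d : List (Int × List (String × Option Int)))
    (st : PySem.Dict Int (List Int) × PySem.Dict Int (List Int))
    (pr : Int × List (String × Option Int)) :
    PySem.Dict Int (List Int) × PySem.Dict Int (List Int) :=
  if st.1.contains pr.1 then (st.1, st.2.insert pr.1 (st.1.getD pr.1 []))
  else
    match (PySem.Dict.mk pr.2).get? "in_reply_to_status_id" with
    | some (some p) =>
      if (PySem.Dict.mk d).contains p then
        let r := pvWalkUp d (d.length + 1) st.1 p [(pr.1, p)]
        let memo2 := r.1.reverse.foldl
          (fun m np => m.insert np.1 (pvInsSorted np.2 (m.getD np.2 []))) r.2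
        (memo2, st.2.insert pr.1 (memo2.getD pr.1 []))
      else (st.1.insert pr.1 [], st.2.insert pr.1 [])
    | _ => (st.1.insert pr.1 [], st.2.insert pr.1 [])

def get_in_reply_to_chains_alt (tweet_id_to_tweet : List (Int × List (String × Option Int))) :
    List (Int × List Int) :=
  (tweet_id_to_tweet.foldl (pvStepB tweet_id_to_tweet)
    (PySem.Dict.empty, PySem.Dict.empty)).2.items

-- ===== PRECONDITION & SPEC =====
-- pvIter d j t = the j-th ancestor of tweet t in the input's reply graph (none once the chain has
-- left the dict): a property of the input graph itself — 'the graph is acyclic' ⟺ 'every tweet's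
-- ancestor line leaves the dict within |dict| steps' — not a copy of either port's computation
-- (the ports accumulate sets / memo tables / paths; pvIter only follows ids).
def pvIter (d : List (Int × List (String × Option Int))) : Nat → Int → Option Int
  | 0, t => some t
  | f+1, t =>
    match pvParent d t with
    | none => none
    | some p => pvIter d f p

-- Pre_ excludes (a) inputs whose reply graph has a cycle — there A's 'while True' walk never
-- terminates, no value is returned — and (b) association lists with duplicate tweet ids, which a
-- Python dict cannot hold (the list stands for a dict).
def Pre_get_in_reply_to_chains (tweet_id_to_tweet : List (Int × List (String × Option Int))) : Prop :=
  (tweet_id_to_tweet.map (·.1)).Nodup ∧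
  ∀ pr ∈ tweet_id_to_tweet, pvIter tweet_id_to_tweet (tweet_id_to_tweet.length + 1) pr.1 = none

instance (tweet_id_to_tweet : List (Int × List (String × Option Int))) :
    Decidable (Pre_get_in_reply_to_chains tweet_id_to_tweet) := by
  unfold Pre_get_in_reply_to_chains; infer_instance

def pvWitness_get_in_reply_to_chains : (List (Int × List (String × Option Int))) :=
  [(1, [("in_reply_to_status_id", some 2)]), (2, [])]

def Spec_get_in_reply_to_chains (tweet_id_to_tweet : List (Int × List (String × Option Int))) (out : List (Int × List Int)) : Prop := out = get_in_reply_to_chains_alt tweet_id_to_tweet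
instance (tweet_id_to_tweet : List (Int × List (String × Option Int))) (out : List (Int × List Int)) : Decidable (Spec_get_in_reply_to_chains tweet_id_to_tweet out) := by unfold Spec_get_in_reply_to_chains; infer_instance

-- ===== CLAIM (what is proved, stated in full; the proofs are below) =====
def Claim_equal_get_in_reply_to_chains : Prop := ∀ (tweet_id_to_tweet : List (Int × List (String × Option Int))), Dom_get_in_reply_to_chains tweet_id_to_tweet → Pre_get_in_reply_to_chains tweet_id_to_tweet → Spec_get_in_reply_to_chains tweet_id_to_tweet (get_in_reply_to_chains tweet_id_to_tweet)

-- ===== LEMMAS AND PROOFS =====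

-- the list of ancestor ids walked from t (the mathematical description of both programs' chains)
def pvWalk (d : List (Int × List (String × Option Int))) : Nat → Int → List Int
  | 0, _ => []
  | f+1, t =>
    match pvParent d t with
    | none => []
    | some p => p :: pvWalk d f p

def pvChain (d : List (Int × List (String × Option Int))) (t : Int) : List Int :=
  PySem.List.sorted (pvWalk d (d.length + 1) t) (fun x => x) false

theorem pvIter_mono (d : List (Int × List (String × Option Int))) :
    ∀ (g f : Nat) (t : Int), f ≤ g → pvIter d f t = none → pvIter d g t = none := by
  intro g
  induction g with
  | zero => intro f t hf h; interval_cases f; simp [pvIter] at h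
  | succ g ih =>
    intro f t hf h
    cases f with
    | zero => simp [pvIter] at h
    | succ f =>
      simp only [pvIter] at h ⊢
      cases hp : pvParent d t with
      | none => rfl
      | some p => rw [hp] at h; exact ih f p (by omega) h

theorem pvIter_add (d : List (Int × List (String × Option Int))) :
    ∀ (a b : Nat) (t : Int), pvIter d (a + b) t =
      (match pvIter d a t with | none => none | some u => pvIter d b u) := by
  intro a
  induction a with
  | zero => intro b t; simp [pvIter]
  | succ a ih =>
    intro b t
    have : a + 1 + b = (a + b) + 1 := by omega
    rw [this]
    simp only [pvIter]
    cases hp : pvParent d t with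
    | none => rfl
    | some p => exact ih b p

theorem pvMem_walk (d : List (Int × List (String × Option Int))) :
    ∀ (f : Nat) (t x : Int), x ∈ pvWalk d f t → ∃ j, 1 ≤ j ∧ pvIter d j t = some x := by
  intro f
  induction f with
  | zero => intro t x h; simp [pvWalk] at h
  | succ f ih =>
    intro t x h
    simp only [pvWalk] at h
    cases hp : pvParent d t with
    | none => rw [hp] at h; simp at h
    | some p =>
      rw [hp] at h
      rcases List.mem_cons.mp h with h1 | h2
      · exact ⟨1, le_refl 1, by simp [pvIter, hp, h1]⟩
      · obtain ⟨j, hj1, hj2⟩ := ih p x h2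
        exact ⟨j + 1, by omega, by simpa [pvIter, hp] using hj2⟩

theorem pvCycle (d : List (Int × List (String × Option Int))) (t : Int) (j : Nat)
    (hj : 1 ≤ j) (h : pvIter d j t = some t) : ∀ k, pvIter d k t ≠ none := by
  have hmul : ∀ m, pvIter d (m * j) t = some t := by
    intro m
    induction m with
    | zero => simp [pvIter]
    | succ m ih =>
      have : (m + 1) * j = m * j + j := by ring
      rw [this, pvIter_add d (m * j) j t, ih]
      exact h
  intro k hk
  have hle : k ≤ k * j := Nat.le_mul_of_pos_right k (by omega)
  have : pvIter d (k * j) t = some t := hmul k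
  have heq : k * j = k + (k * j - k) := by omega
  rw [heq, pvIter_add d k (k * j - k) t, hk] at this
  simp at this

theorem pvNot_mem_walk (d : List (Int × List (String × Option Int))) (f : Nat) (t : Int)
    (h : pvIter d f t = none) : t ∉ pvWalk d f t := by
  intro hmem
  obtain ⟨j, hj1, hj2⟩ := pvMem_walk d f t t hmem
  exact pvCycle d t j hj1 hj2 f h

theorem pvHalt_parent (d : List (Int × List (String × Option Int))) (f : Nat) (t p : Int)
    (h : pvIter d (f + 1) t = none) (hp : pvParent d t = some p) : pvIter d f p = none := by
  simpa [pvIter, hp] using h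

theorem pvWalk_nodup (d : List (Int × List (String × Option Int))) :
    ∀ (f : Nat) (t : Int), pvIter d f t = none → (pvWalk d f t).Nodup := by
  intro f
  induction f with
  | zero => intro t _; simp [pvWalk]
  | succ f ih =>
    intro t h
    simp only [pvWalk]
    cases hp : pvParent d t with
    | none => simp
    | some p =>
      have hp' : pvIter d f p = none := pvHalt_parent d f t p h hp
      exact List.nodup_cons.mpr ⟨pvNot_mem_walk d f p hp', ih p hp'⟩

theorem pvWalk_stable (d : List (Int × List (String × Option Int))) :
    ∀ (f g : Nat) (t : Int), f ≤ g → pvIter d f t = none → pvWalk d g t = pvWalk d f t := by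
  intro f
  induction f with
  | zero => intro g t _ h; simp [pvIter] at h
  | succ f ih =>
    intro g t hf h
    cases g with
    | zero => omega
    | succ g =>
      cases hp : pvParent d t with
      | none => simp [pvWalk, hp]
      | some p =>
        simp only [pvWalk, hp]
        rw [ih g p (by omega) (pvHalt_parent d f t p h hp)]

theorem pvWalk_unfold (d : List (Int × List (String × Option Int))) (m : Nat) (t p : Int)
    (h : pvIter d (m + 1) t = none) (hp : pvParent d t = some p) :
    pvWalk d (m + 1) t = p :: pvWalk d (m + 1) p ∧ pvIter d (m + 1) p = none := by
  have hm : pvIter d m p = none := pvHalt_parent d m t p h hp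
  constructor
  · have h1 : pvWalk d (m + 1) t = p :: pvWalk d m p := by simp [pvWalk, hp]
    rw [h1, pvWalk_stable d m (m + 1) p (by omega) hm]
  · exact pvIter_mono d (m + 1) m p (by omega) hm

-- ---- A side ----

theorem pvItemsEmpty {ν : Type} : (PySem.Dict.empty : PySem.Dict Int ν).items = [] := rfl

theorem pvWalkA_eq_update (d : List (Int × List (String × Option Int))) :
    ∀ (f : Nat) (t : Int) (tw : List (String × Option Int)) (s : PySem.Set Int),
      (PySem.Dict.mk d).get? t = some tw →
      pvWalkA d f tw s = PySem.Set.update s (pvWalk d f t) := by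
  intro f
  induction f with
  | zero => intro t tw s _; simp [pvWalkA, pvWalk, PySem.Set.update_nil]
  | succ f ih =>
    intro t tw s ht
    simp only [pvWalkA, pvWalk]
    have hpar : pvParent d t =
        (match (PySem.Dict.mk tw).get? "in_reply_to_status_id" with
         | some (some p) => if (PySem.Dict.mk d).contains p then some p else none
         | _ => none) := by
      simp [pvParent, ht]
    cases h2 : (PySem.Dict.mk tw).get? "in_reply_to_status_id" with
    | none =>
      have hpn : pvParent d t = none := by rw [hpar, h2]
      simp [hpn, PySem.Set.update_nil]
    | some v =>
      cases v with
      | none =>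
        have hpn : pvParent d t = none := by rw [hpar, h2]
        simp [hpn, PySem.Set.update_nil]
      | some p =>
        cases h3 : (PySem.Dict.mk d).get? p with
        | none =>
          have hcf : (PySem.Dict.mk d).contains p = false := by
            rw [PySem.Dict.contains_eq_isSome_get?, h3]; rfl
          have hpn : pvParent d t = none := by rw [hpar, h2]; simp [hcf]
          simp [h3, hpn, PySem.Set.update_nil]
        | some tw' =>
          have hct : (PySem.Dict.mk d).contains p = true := by
            rw [PySem.Dict.contains_eq_isSome_get?, h3]; rfl
          have hpn : pvParent d t = some p := by rw [hpar, h2]; simp [hct]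
          simp only [h3, hpn]
          rw [PySem.Set.update_cons]
          exact ih p tw' (PySem.Set.add s p) h3

theorem pvItems_mk (d : List (Int × List (String × Option Int))) :
    (PySem.Dict.mk d).items = d := rfl

theorem pvGetOfMem (d : List (Int × List (String × Option Int)))
    (hnd : (d.map (·.1)).Nodup) (pr : Int × List (String × Option Int)) (hpr : pr ∈ d) :
    (PySem.Dict.mk d).get? pr.1 = some pr.2 := by
  exact PySem.Dict.get?_of_mem_items (PySem.Dict.mk d) (by simpa [pvItems_mk] using hpr) hnd

theorem pvA_result (d : List (Int × List (String × Option Int)))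
    (hpre : Pre_get_in_reply_to_chains d) :
    get_in_reply_to_chains d = d.map (fun pr => (pr.1, pvChain d pr.1)) := by
  obtain ⟨hnd, hhalt⟩ := hpre
  unfold get_in_reply_to_chains
  simp only
  rw [PySem.Dict.items_foldl_insert_fresh d (fun pr => pr.1)
    (fun pr => pvWalkA d (d.length + 1) pr.2 PySem.Set.empty) PySem.Dict.empty
    (fun a _ => PySem.Dict.contains_empty a.1) hnd]
  simp only [pvItemsEmpty, List.nil_append]
  rw [PySem.Dict.items_foldl_insert_fresh (d.map fun pr => (pr.1, pvWalkA d (d.length + 1) pr.2 PySem.Set.empty))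
    (fun pr => pr.1) (fun pr => PySem.List.sorted pr.2 (fun x => x) false) PySem.Dict.empty
    (fun a _ => PySem.Dict.contains_empty a.1)
    (by simpa [List.map_map, Function.comp] using hnd)]
  simp only [pvItemsEmpty, List.nil_append, List.map_map]
  apply List.map_congr_left
  intro pr hpr
  simp only [Function.comp]
  congr 1
  have hget : (PySem.Dict.mk d).get? pr.1 = some pr.2 := pvGetOfMem d hnd pr hpr
  rw [pvWalkA_eq_update d (d.length + 1) pr.1 pr.2 PySem.Set.empty hget,
    PySem.Set.update_empty,
    PySem.Set.ofList_eq_self_of_nodup _ (pvWalk_nodup d (d.length + 1) pr.1 (hhalt pr hpr))]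
  rfl

-- ---- B side ----

def pvInv (d : List (Int × List (String × Option Int))) (m : PySem.Dict Int (List Int)) : Prop :=
  ∀ k v, m.get? k = some v → v = pvChain d k

theorem pvInv_empty (d : List (Int × List (String × Option Int))) :
    pvInv d PySem.Dict.empty := by
  intro k v h
  simp [PySem.Dict.get?_empty] at h

theorem pvInv_insert (d : List (Int × List (String × Option Int)))
    (m : PySem.Dict Int (List Int)) (k : Int) (v : List Int)
    (hm : pvInv d m) (hv : v = pvChain d k) : pvInv d (m.insert k v) := by
  intro k' v' h
  rw [PySem.Dict.get?_insert] at h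
  split at h
  · rename_i heq; cases h; rw [heq]; exact hv
  · exact hm k' v' h

theorem pvWalkUp_path (d : List (Int × List (String × Option Int))) :
    ∀ (f : Nat) (memo : PySem.Dict Int (List Int)) (cur : Int) (path : List (Int × Int)),
      pvWalkUp d f memo cur path =
        (path ++ (pvWalkUp d f memo cur []).1, (pvWalkUp d f memo cur []).2) := by
  intro f
  induction f with
  | zero => intro memo cur path; simp [pvWalkUp]
  | succ f ih =>
    intro memo cur path
    by_cases hc : memo.contains cur
    · simp [pvWalkUp, hc]
    · cases hp : pvParent d cur with
      | none => simp [pvWalkUp, hc, hp]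
      | some p =>
        rw [show pvWalkUp d (f + 1) memo cur path = pvWalkUp d f memo p (path ++ [(cur, p)]) from by
          simp [pvWalkUp, hc, hp]]
        rw [show pvWalkUp d (f + 1) memo cur [] = pvWalkUp d f memo p [(cur, p)] from by
          simp [pvWalkUp, hc, hp]]
        rw [ih memo p (path ++ [(cur, p)]), ih memo p [(cur, p)]]
        simp

theorem pvSorted_nil : PySem.List.sorted ([] : List Int) (fun x => x) false = [] := by
  have := PySem.List.sorted_eq_of_perm_of_pairwise_lt ([] : List Int) [] (fun x => x)
    (List.Perm.refl []) (List.Pairwise.nil)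
  simpa using this

theorem pvInsSorted_spec (p : Int) :
    ∀ (ys : List Int), ys.Pairwise (· < ·) → p ∉ ys →
      (pvInsSorted p ys).Pairwise (· < ·) ∧ (pvInsSorted p ys).Perm (p :: ys) := by
  intro ys
  induction ys with
  | nil => intro _ _; simp [pvInsSorted]
  | cons y ys ih =>
    intro hpw hnm
    have hy : ∀ z ∈ ys, y < z := fun z hz => List.rel_of_pairwise_cons hpw hz
    have hpw' : ys.Pairwise (· < ·) := List.Pairwise.of_cons hpw
    have hpy : p ≠ y := by intro h; exact hnm (by simp [h])
    have hnm' : p ∉ ys := fun h => hnm (List.mem_cons_of_mem y h)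
    simp only [pvInsSorted]
    by_cases hlt : y < p
    · simp only [hlt, if_true]
      obtain ⟨hpw2, hperm2⟩ := ih hpw' hnm'
      constructor
      · refine List.pairwise_cons.mpr ⟨?_, hpw2⟩
        intro z hz
        have : z ∈ p :: ys := hperm2.mem_iff.mp hz
        rcases List.mem_cons.mp this with h | h
        · exact h ▸ hlt
        · exact hy z h
      · exact (hperm2.cons y).trans (List.Perm.swap p y ys)
    · simp only [hlt, if_false]
      have hplt : p < y := lt_of_le_of_ne (not_lt.mp hlt) hpy
      constructor
      · refine List.pairwise_cons.mpr ⟨?_, hpw⟩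
        intro z hz
        rcases List.mem_cons.mp hz with h | h
        · exact h ▸ hplt
        · exact lt_trans hplt (hy z h)
      · exact List.Perm.refl _

theorem pvIns_chain (d : List (Int × List (String × Option Int))) (t p : Int)
    (h : pvIter d (d.length + 1) t = none) (hp : pvParent d t = some p) :
    pvInsSorted p (pvChain d p) = pvChain d t := by
  obtain ⟨hw, hhp⟩ := pvWalk_unfold d d.length t p h hp
  set xs := pvWalk d (d.length + 1) p with hxs
  have hnd : xs.Nodup := pvWalk_nodup d (d.length + 1) p hhp
  have hnm : p ∉ xs := pvNot_mem_walk d (d.length + 1) p hhp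
  set ys := PySem.List.sorted xs (fun x => x) false with hys
  have hperm : ys.Perm xs := PySem.List.sorted_perm xs (fun x => x) false
  have hle : ys.Pairwise (· ≤ ·) := PySem.List.sorted_pairwise xs (fun x => x)
  have hndys : ys.Nodup := hperm.nodup_iff.mpr hnd
  have hlt : ys.Pairwise (· < ·) :=
    (hle.and hndys).imp (fun h => lt_of_le_of_ne h.1 h.2)
  have hnmys : p ∉ ys := fun hm => hnm (hperm.mem_iff.mp hm)
  obtain ⟨hpw, hpm⟩ := pvInsSorted_spec p ys hlt hnmys
  have : PySem.List.sorted (p :: xs) (fun x => x) false = pvInsSorted p ys :=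
    PySem.List.sorted_eq_of_perm_of_pairwise_lt (p :: xs) (pvInsSorted p ys) (fun x => x)
      (hpm.trans (hperm.cons p)) hpw
  unfold pvChain
  rw [hw, this]

theorem pvB_main (d : List (Int × List (String × Option Int))) :
    ∀ (f : Nat) (cur : Int) (memo : PySem.Dict Int (List Int)),
      pvInv d memo → pvIter d f cur = none → f ≤ d.length + 1 →
      pvInv d ((pvWalkUp d f memo cur []).1.reverse.foldl
          (fun m np => m.insert np.1 (pvInsSorted np.2 (m.getD np.2 []))) (pvWalkUp d f memo cur []).2) ∧
      ((pvWalkUp d f memo cur []).1.reverse.foldl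
          (fun m np => m.insert np.1 (pvInsSorted np.2 (m.getD np.2 []))) (pvWalkUp d f memo cur []).2).get? cur
        = some (pvChain d cur) := by
  intro f
  induction f with
  | zero => intro cur memo _ h _; simp [pvIter] at h
  | succ f ih =>
    intro cur memo hinv h hf
    have hhaltn : pvIter d (d.length + 1) cur = none := pvIter_mono d (d.length + 1) (f + 1) cur hf h
    by_cases hc : memo.contains cur = true
    · rw [show pvWalkUp d (f + 1) memo cur [] = ([], memo) from by simp [pvWalkUp, hc]]
      simp only [List.reverse_nil, List.foldl_nil]
      have hsome : (memo.get? cur).isSome := by rw [← PySem.Dict.contains_eq_isSome_get?, hc]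
      obtain ⟨v, hv⟩ := Option.isSome_iff_exists.mp hsome
      exact ⟨hinv, by rw [hv, hinv cur v hv]⟩
    · cases hp : pvParent d cur with
      | none =>
        rw [show pvWalkUp d (f + 1) memo cur [] = ([], memo.insert cur []) from by
          simp [pvWalkUp, hc, hp]]
        simp only [List.reverse_nil, List.foldl_nil]
        have hchain : pvChain d cur = [] := by
          unfold pvChain
          have : pvWalk d (d.length + 1) cur = [] := by simp [pvWalk, hp]
          rw [this, pvSorted_nil]
        exact ⟨pvInv_insert d memo cur [] hinv hchain.symm,
          by rw [PySem.Dict.get?_insert]; simp [hchain]⟩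
      | some p =>
        rw [show pvWalkUp d (f + 1) memo cur [] = pvWalkUp d f memo p [(cur, p)] from by
          simp [pvWalkUp, hc, hp]]
        rw [pvWalkUp_path d f memo p [(cur, p)]]
        simp only [List.reverse_append, List.reverse_cons, List.reverse_nil, List.nil_append,
          List.foldl_append, List.foldl_cons, List.foldl_nil]
        have hhp : pvIter d f p = none := pvHalt_parent d f cur p h hp
        obtain ⟨hinv2, hget2⟩ := ih p memo hinv hhp (by omega)
        set m2 := ((pvWalkUp d f memo p []).1.reverse.foldl
          (fun m np => m.insert np.1 (pvInsSorted np.2 (m.getD np.2 []))) (pvWalkUp d f memo p []).2) with hm2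
        have hgd : m2.getD p [] = pvChain d p := PySem.Dict.getD_of_get?_eq_some m2 [] hget2
        have hval : pvInsSorted p (m2.getD p []) = pvChain d cur := by
          rw [hgd]; exact pvIns_chain d cur p hhaltn hp
        exact ⟨pvInv_insert d m2 cur _ hinv2 hval,
          by rw [PySem.Dict.get?_insert]; simp [hval]⟩

theorem pvChain_nil (d : List (Int × List (String × Option Int))) (t : Int)
    (hp : pvParent d t = none) : pvChain d t = [] := by
  unfold pvChain
  have : pvWalk d (d.length + 1) t = [] := by simp [pvWalk, hp]
  rw [this, pvSorted_nil]

theorem pvB_fold (d : List (Int × List (String × Option Int)))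
    (hnd : (d.map (·.1)).Nodup)
    (hhalt : ∀ pr ∈ d, pvIter d (d.length + 1) pr.1 = none) :
    ∀ (l : List (Int × List (String × Option Int))), (∀ pr ∈ l, pr ∈ d) →
    ∀ (memo res : PySem.Dict Int (List Int)), pvInv d memo →
      (l.foldl (pvStepB d) (memo, res)).2 =
        l.foldl (fun r pr => r.insert pr.1 (pvChain d pr.1)) res := by
  intro l
  induction l with
  | nil => intro _ memo res _; rfl
  | cons pr l ih =>
    intro hsub memo res hinv
    simp only [List.foldl_cons]
    have hmem : pr ∈ d := hsub pr (List.mem_cons_self)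
    have hhc : pvIter d (d.length + 1) pr.1 = none := hhalt pr hmem
    have hget : (PySem.Dict.mk d).get? pr.1 = some pr.2 := pvGetOfMem d hnd pr hmem
    have hpar : pvParent d pr.1 =
        (match (PySem.Dict.mk pr.2).get? "in_reply_to_status_id" with
         | some (some p) => if (PySem.Dict.mk d).contains p then some p else none
         | _ => none) := by
      simp [pvParent, hget]
    have hih := ih (fun q hq => hsub q (List.mem_cons_of_mem pr hq))
    by_cases hc : memo.contains pr.1 = true
    · -- tid already memoized
      obtain ⟨v, hv⟩ := Option.isSome_iff_exists.mp
        (by rw [← PySem.Dict.contains_eq_isSome_get?, hc] : (memo.get? pr.1).isSome)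
      have hstep : pvStepB d (memo, res) pr = (memo, res.insert pr.1 (pvChain d pr.1)) := by
        unfold pvStepB
        simp only [hc, if_true]
        rw [PySem.Dict.getD_of_get?_eq_some _ [] hv, hinv pr.1 v hv]
      rw [hstep]; exact hih _ _ hinv
    · cases h2 : (PySem.Dict.mk pr.2).get? "in_reply_to_status_id" with
      | none =>
        have hpn : pvParent d pr.1 = none := by rw [hpar, h2]
        have hstep : pvStepB d (memo, res) pr =
            (memo.insert pr.1 [], res.insert pr.1 (pvChain d pr.1)) := by
          unfold pvStepB
          simp only [hc, Bool.false_eq_true, if_false, h2, pvChain_nil d pr.1 hpn]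
        rw [hstep]
        exact hih _ _ (pvInv_insert d memo pr.1 [] hinv (pvChain_nil d pr.1 hpn).symm)
      | some v =>
        cases v with
        | none =>
          have hpn : pvParent d pr.1 = none := by rw [hpar, h2]
          have hstep : pvStepB d (memo, res) pr =
              (memo.insert pr.1 [], res.insert pr.1 (pvChain d pr.1)) := by
            unfold pvStepB
            simp only [hc, Bool.false_eq_true, if_false, h2, pvChain_nil d pr.1 hpn]
          rw [hstep]
          exact hih _ _ (pvInv_insert d memo pr.1 [] hinv (pvChain_nil d pr.1 hpn).symm)
        | some p =>
          by_cases hct : (PySem.Dict.mk d).contains p = true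
          · -- real parent: walk up from p with initial path [(tid, p)]
            have hpp : pvParent d pr.1 = some p := by rw [hpar, h2]; simp [hct]
            have hhp : pvIter d (d.length + 1) p = none :=
              pvIter_mono d (d.length + 1) d.length p (by omega)
                (pvHalt_parent d d.length pr.1 p hhc hpp)
            obtain ⟨hinv2, hget2⟩ := pvB_main d (d.length + 1) p memo hinv hhp (le_refl _)
            set m2 := ((pvWalkUp d (d.length + 1) memo p []).1.reverse.foldl
              (fun m np => m.insert np.1 (pvInsSorted np.2 (m.getD np.2 [])))
              (pvWalkUp d (d.length + 1) memo p []).2) with hm2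
            have hval : pvInsSorted p (m2.getD p []) = pvChain d pr.1 := by
              rw [PySem.Dict.getD_of_get?_eq_some m2 [] hget2]
              exact pvIns_chain d pr.1 p hhc hpp
            have hstep : pvStepB d (memo, res) pr =
                (m2.insert pr.1 (pvInsSorted p (m2.getD p [])),
                  res.insert pr.1 (pvChain d pr.1)) := by
              unfold pvStepB
              simp only [hc, Bool.false_eq_true, if_false, h2, hct, if_true]
              rw [pvWalkUp_path d (d.length + 1) memo p [(pr.1, p)]]
              simp only [List.reverse_append, List.reverse_cons, List.reverse_nil,
                List.nil_append, List.foldl_append, List.foldl_cons, List.foldl_nil, ← hm2]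
              congr 1
              rw [PySem.Dict.getD_insert]
              simp [hval]
            rw [hstep]
            exact hih _ _ (pvInv_insert d m2 pr.1 _ hinv2 hval)
          · have hpn : pvParent d pr.1 = none := by rw [hpar, h2]; simp [hct]
            have hstep : pvStepB d (memo, res) pr =
                (memo.insert pr.1 [], res.insert pr.1 (pvChain d pr.1)) := by
              unfold pvStepB
              simp only [hc, Bool.false_eq_true, if_false, h2, hct,
                pvChain_nil d pr.1 hpn]
            rw [hstep]
            exact hih _ _ (pvInv_insert d memo pr.1 [] hinv (pvChain_nil d pr.1 hpn).symm)

theorem pvB_result (d : List (Int × List (String × Option Int)))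
    (hpre : Pre_get_in_reply_to_chains d) :
    get_in_reply_to_chains_alt d = d.map (fun pr => (pr.1, pvChain d pr.1)) := by
  obtain ⟨hnd, hhalt⟩ := hpre
  unfold get_in_reply_to_chains_alt
  rw [pvB_fold d hnd hhalt d (fun _ h => h) PySem.Dict.empty PySem.Dict.empty (pvInv_empty d)]
  rw [PySem.Dict.items_foldl_insert_fresh d (fun pr => pr.1) (fun pr => pvChain d pr.1)
    PySem.Dict.empty (fun a _ => PySem.Dict.contains_empty a.1) hnd]
  simp [pvItemsEmpty]

-- ===== VERDICT (by name: the statement is the Claim_ definition above) =====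
theorem get_in_reply_to_chains_spec : Claim_equal_get_in_reply_to_chains := by
  intro d _ hpre
  unfold Spec_get_in_reply_to_chains
  rw [pvA_result d hpre, pvB_result d hpre]
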